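-- pv_equiv track=rewrite | github.com/achyuthdasari/ach_CompetitiveProg | 07-isfactorish-Python/isfactorish.py | fun_isfactorish
-- ===== SOURCE A (Python) =====
-- def fun_isfactorish(n):
-- 	n=abs(n)
-- 	num=n
-- 	cnt=0
-- 	lst=[]
-- 	while(n>0):
-- 		cnt+=1
-- 		if (n%10 in lst) or cnt>3 or n%10==0 or num%(n%10)!=0:
-- 			return False
-- 		lst.append(n%10)
-- 		n=n//10
-- 	return True
-- ===== SOURCE B (Python) =====
-- def fun_isfactorish(n):
--     # Closed-form: a number with more than three digits can never qualify,
--     # so read off at most three digits arithmetically and test them directly.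
--     m = abs(n)
--     if m == 0:
--         return True          # no digits at all
--     if m >= 1000:
--         return False         # more than three digits
--     a = m % 10
--     b = m // 10 % 10
--     c = m // 100
--     if a == 0 or m % a != 0:
--         return False
--     if m < 10:
--         return True
--     if b == 0 or b == a or m % b != 0:
--         return False
--     if m < 100:
--         return True
--     return c != a and c != b and m % c == 0
-- ===== Notes on version B (the rewrite author's own statement) =====
-- stated objective: alternative
-- what changed: Replaces A's incremental digit loop (running seen-list + counter + in-loop returns) with a loop-free closed-form range-case decision over the at most three digits (ones, tens, hundreds) extracted arithmetically.
import Mathlib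
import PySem

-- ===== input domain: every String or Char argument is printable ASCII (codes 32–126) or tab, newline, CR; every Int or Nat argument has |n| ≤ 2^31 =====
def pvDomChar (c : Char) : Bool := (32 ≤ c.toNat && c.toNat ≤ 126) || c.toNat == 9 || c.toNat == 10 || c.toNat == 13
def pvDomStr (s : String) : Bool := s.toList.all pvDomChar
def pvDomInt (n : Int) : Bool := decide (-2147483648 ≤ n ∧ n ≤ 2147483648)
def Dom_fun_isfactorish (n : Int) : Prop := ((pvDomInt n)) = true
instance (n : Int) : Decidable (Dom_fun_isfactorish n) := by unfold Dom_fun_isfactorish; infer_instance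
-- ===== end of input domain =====

-- B replaces A's incremental digit loop with a loop-free closed-form range-case
-- decision over the at most three digits (objective: alternative, same cost on small inputs).

-- ===== PORT A =====
-- the while-loop of A: state (n, num, cnt, lst), decreasing on n
def isfLoop (n num cnt : Int) (lst : List Int) : Bool :=
  if _hn : 0 < n then
    let cnt' := cnt + 1
    if lst.contains (PySem.Int.mod n 10) || decide (cnt' > 3) ||
       (PySem.Int.mod n 10 == 0) || (PySem.Int.mod num (PySem.Int.mod n 10) != 0) then
      false
    else
      isfLoop (PySem.Int.floordiv n 10) num cnt' (lst ++ [PySem.Int.mod n 10])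
  else
    true
termination_by n.toNat
decreasing_by
  have h10 : PySem.Int.floordiv n 10 = n / 10 := PySem.Int.floordiv_eq_ediv_of_pos (by omega)
  rw [h10]; omega

def fun_isfactorish (n : Int) : Bool :=
  isfLoop |n| |n| 0 []

-- ===== PORT B =====
def fun_isfactorish_alt (n : Int) : Bool :=
  let m := |n|
  if m == 0 then true            -- no digits at all
  else if decide (m ≥ 1000) then false   -- more than three digits
  else
    let a := PySem.Int.mod m 10
    let b := PySem.Int.mod (PySem.Int.floordiv m 10) 10
    let c := PySem.Int.floordiv m 100
    if a == 0 || PySem.Int.mod m a != 0 then false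
    else if decide (m < 10) then true
    else if b == 0 || b == a || PySem.Int.mod m b != 0 then false
    else if decide (m < 100) then true
    else decide (c ≠ a) && decide (c ≠ b) && (PySem.Int.mod m c == 0)

-- ===== PRECONDITION & SPEC =====
def Spec_fun_isfactorish (n : Int) (out : Bool) : Prop := out = fun_isfactorish_alt n
instance (n : Int) (out : Bool) : Decidable (Spec_fun_isfactorish n out) := by unfold Spec_fun_isfactorish; infer_instance

-- ===== CLAIM (what is proved, stated in full; the proofs are below) =====
def Claim_equal_fun_isfactorish : Prop := ∀ (n : Int), Dom_fun_isfactorish n → Spec_fun_isfactorish n (fun_isfactorish n)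

-- ===== LEMMAS AND PROOFS =====

theorem isfLoop_eq_alt (m : Int) (hm : 0 ≤ m) :
    isfLoop m m 0 [] = fun_isfactorish_alt m := by
  have hmod : ∀ x : Int, PySem.Int.mod x 10 = x % 10 :=
    fun x => PySem.Int.mod_eq_emod_of_pos (by norm_num)
  have hdiv : ∀ x : Int, PySem.Int.floordiv x 10 = x / 10 :=
    fun x => PySem.Int.floordiv_eq_ediv_of_pos (by norm_num)
  have hdiv100 : PySem.Int.floordiv m 100 = m / 100 :=
    PySem.Int.floordiv_eq_ediv_of_pos (by norm_num)
  unfold fun_isfactorish_alt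
  have habs : |m| = m := abs_of_nonneg hm
  rw [habs]
  by_cases h0 : m = 0
  · subst h0; rw [isfLoop]; simp
  · -- m > 0
    have hpos : 0 < m := lt_of_le_of_ne hm (Ne.symm h0)
    rw [isfLoop, dif_pos hpos]
    simp only [hmod, hdiv, hdiv100, List.contains_nil, Bool.false_or, beq_iff_eq, h0,
      if_false, bne_iff_ne, ne_eq, decide_eq_true_eq]
    -- first-iteration guard = B's first guard (the cnt check 1 > 3 is false)
    have hc1 : ¬ ((1:Int) > 3) := by norm_num
    by_cases hA : m % 10 = 0 ∨ ¬ PySem.Int.mod m (m % 10) = 0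
    · -- first digit fails: both false
      by_cases hge : m ≥ 1000 <;>
      · rcases hA with h | h
        · have hd : (10:Int) ∣ m := by omega
          simp [h, hd, hc1, hge]
        · simp [h, hc1, hge]
    · push_neg at hA
      obtain ⟨ha0, hdvd⟩ := hA
      have hnd1 : ¬ (10:Int) ∣ m := by omega
      by_cases hlt10 : m < 10
      · -- one digit: loop recurses once with 0, both true
        have h10 : m / 10 = 0 := by omega
        rw [isfLoop]
        simp [h10, hc1, ha0, hnd1, hdvd, show ¬ m ≥ 1000 by omega, hlt10]
      · -- at least two digits
        have hpos2 : 0 < m / 10 := by omega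
        rw [isfLoop, dif_pos (by simpa [hdiv] using hpos2)]
        simp only [hmod, hdiv, List.contains_cons, List.contains_nil, Bool.or_false,
          beq_iff_eq, bne_iff_ne, ne_eq, decide_eq_true_eq]
        have hc2 : ¬ ((1:Int) + 1 > 3) := by norm_num
        by_cases hB : m / 10 % 10 = m % 10 ∨ m / 10 % 10 = 0 ∨ ¬ PySem.Int.mod m (m / 10 % 10) = 0
        · -- second digit fails: both false
          by_cases hge : m ≥ 1000 <;>
          · rcases hB with h | h | h
            · simp [h, hc1, hc2, ha0, hnd1, hdvd, hge, show ¬ m < 10 by omega]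
            · have hd : (10:Int) ∣ m / 10 := by omega
              simp [h, hd, hc1, hc2, ha0, hnd1, hdvd, hge, show ¬ m < 10 by omega]
            · simp [h, hc1, hc2, ha0, hnd1, hdvd, hge, show ¬ m < 10 by omega]
        · push_neg at hB
          obtain ⟨hba, hb0, hbdvd⟩ := hB
          have hnd2 : ¬ (10:Int) ∣ m / 10 := by omega
          by_cases hlt100 : m < 100
          · -- exactly two digits
            have h100 : m / 10 / 10 = 0 := by omega
            rw [isfLoop]
            simp [hc1, hc2, ha0, hnd1, hdvd, hba, hb0, hnd2, hbdvd, h100,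
              show ¬ m ≥ 1000 by omega, show ¬ m < 10 by omega, hlt100]
          · -- at least three digits
            have hpos3 : 0 < m / 10 / 10 := by omega
            rw [isfLoop, dif_pos (by simpa [hdiv] using hpos3)]
            simp only [hmod, hdiv, List.contains_cons, List.contains_nil, Bool.or_false,
              beq_iff_eq, bne_iff_ne, ne_eq, decide_eq_true_eq]
            have hc3 : ¬ ((1:Int) + 1 + 1 > 3) := by norm_num
            by_cases hlt1000 : m < 1000
            · -- exactly three digits: third digit is m/100 itself
              have hcc : m / 10 / 10 % 10 = m / 100 := by omega
              have hq : PySem.Int.mod m (m / 10 / 10 % 10) = PySem.Int.mod m (m / 100) := by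
                rw [hcc]
              by_cases hC : m / 100 = m % 10 ∨ m / 100 = m / 10 % 10 ∨ ¬ PySem.Int.mod m (m / 100) = 0
              · rcases hC with h | h | h <;>
                  simp [h, hc1, hc2, hc3, ha0, hnd1, hdvd, hba, hb0, hnd2, hbdvd, hcc, hq,
                    show ¬ m ≥ 1000 by omega, show ¬ m < 10 by omega, show ¬ m < 100 by omega] <;>
                  tauto
              · push_neg at hC
                obtain ⟨hca, hcb, hcdvd⟩ := hC
                have h1000 : m / 10 / 10 / 10 = 0 := by omega
                rw [isfLoop]
                simp [hc1, hc2, hc3, ha0, hnd1, hdvd, hba, hb0, hnd2, hbdvd, hcc, hq, hca, hcb, hcdvd, h1000,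
                  show ¬ m / 100 = 0 by omega, show ¬ m ≥ 1000 by omega, show ¬ m < 10 by omega, show ¬ m < 100 by omega]
            · -- four or more digits: 4th iteration hits cnt > 3, every branch false
              by_cases hC : m / 10 / 10 % 10 = m % 10 ∨ m / 10 / 10 % 10 = m / 10 % 10 ∨
                  m / 10 / 10 % 10 = 0 ∨ ¬ PySem.Int.mod m (m / 10 / 10 % 10) = 0
              · rcases hC with h | h | h | h
                · simp [h, hc1, hc2, hc3, ha0, hnd1, hdvd, hba, hb0, hnd2, hbdvd, show m ≥ 1000 by omega]
                · simp [h, hc1, hc2, hc3, ha0, hnd1, hdvd, hba, hb0, hnd2, hbdvd, show m ≥ 1000 by omega]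
                · have hd : (10:Int) ∣ m / 10 / 10 := by omega
                  simp [h, hd, hc1, hc2, hc3, ha0, hnd1, hdvd, hba, hb0, hnd2, hbdvd, show m ≥ 1000 by omega]
                · simp [h, hc1, hc2, hc3, ha0, hnd1, hdvd, hba, hb0, hnd2, hbdvd, show m ≥ 1000 by omega]
              · push_neg at hC
                obtain ⟨h1, h2, h3, h4⟩ := hC
                have hpos4 : 0 < m / 10 / 10 / 10 := by omega
                rw [isfLoop, dif_pos (by simpa [hdiv] using hpos4)]
                simp [hc1, hc2, hc3, ha0, hnd1, hdvd, hba, hb0, hnd2, hbdvd, h1, h2, h3, h4,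
                  show m ≥ 1000 by omega, show (1:Int) + 1 + 1 + 1 > 3 by norm_num]

-- ===== VERDICT (by name: the statement is the Claim_ definition above) =====
theorem fun_isfactorish_spec : Claim_equal_fun_isfactorish := by
  intro n _
  unfold Spec_fun_isfactorish fun_isfactorish
  have := isfLoop_eq_alt |n| (abs_nonneg n)
  rw [this]
  unfold fun_isfactorish_alt
  simp [abs_abs]
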